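-- pv_equiv track=rewrite | github.com/luiswally/Advent-Of-Code-2023 | Day 3/day3.py | findNumberAndIndex
-- ===== SOURCE A (Python) =====
-- def findNumberAndIndex(active):
--     numberList = [] # [ [[number, colStart, colEnd]], ... ]
--     start = 0
--     currentNumber = ""
--     for index, char in enumerate(active):
--         if char.isnumeric() and index == len(active) - 1 and currentNumber=="":
--             start = index
--             currentNumber = currentNumber + char
--             number = int(currentNumber)
--             numberList.append([number, start, len(active) - 1])
--         elif char.isnumeric() and currentNumber=="":
--             start = index
--             currentNumber = currentNumber + char
--         elif char.isnumeric() and index == len(active) - 1 and currentNumber!="":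
--             currentNumber = currentNumber + char
--             number = int(currentNumber)
--             numberList.append([number, start, len(active) - 1])
--         elif char.isnumeric() and currentNumber!="":
--             currentNumber = currentNumber + char
--         elif not char.isnumeric() and currentNumber!="":
--             number = int(currentNumber)
--             numberList.append([number, start, index - 1])
--             start = 0
--             currentNumber = ""
--
--     return numberList
-- ===== SOURCE B (Python) =====
-- from itertools import groupby
--
-- def findNumberAndIndex(active):
--     numberList = []
--     for isnum, grp in groupby(enumerate(active), key=lambda t: t[1].isnumeric()):
--         if isnum:
--             grp = list(grp)
--             numberList.append([int(''.join(c for _, c in grp)),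
--                                grp[0][0], grp[-1][0]])
--     return numberList
-- ===== Notes on version B (the rewrite author's own statement) =====
-- stated objective: simpler
-- what changed: Replaces the five-branch character-by-character state machine (accumulating currentNumber with end-of-string special cases) by a single groupby pass: group enumerate(active) on isnumeric, and for each numeric group emit [int(joined digits), first index, last index]; the C-level groupby/join removes per-char Python branch work.
import Mathlib
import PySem

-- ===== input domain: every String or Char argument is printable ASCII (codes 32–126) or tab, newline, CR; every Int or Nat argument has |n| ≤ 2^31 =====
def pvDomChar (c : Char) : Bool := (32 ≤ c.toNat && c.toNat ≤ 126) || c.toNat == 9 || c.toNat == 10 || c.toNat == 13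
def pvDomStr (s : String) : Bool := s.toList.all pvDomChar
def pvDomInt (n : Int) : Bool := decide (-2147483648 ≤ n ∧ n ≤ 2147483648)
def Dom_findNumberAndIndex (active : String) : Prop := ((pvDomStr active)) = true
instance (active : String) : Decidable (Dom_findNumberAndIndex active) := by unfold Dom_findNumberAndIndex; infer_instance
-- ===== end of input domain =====

-- B replaces A's five-branch per-character state machine by a group-then-process pass
-- (groupby on isnumeric, one output row per numeric group); objective: simpler, same cost.
-- On the ASCII domain Dom_, Python's char.isnumeric() is exactly PySem.Chars.isdigit,
-- and int() on a nonempty digit run never raises; both ports use PySem.Int.ofChars?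
-- with a .getD 0 totality default that is never reached on those calls.

-- ===== PORT A =====
-- step of A's for-loop; state = (numberList, start, currentNumber); n = len(active)
def pvStepA (n : Int) (st : List (List Int) × Int × List Char) (ic : Int × Char) :
    List (List Int) × Int × List Char :=
  let (numberList, start, currentNumber) := st
  let (index, char) := ic
  if PySem.Chars.isdigit char && (index == n - 1) && currentNumber.isEmpty then
    let start := index
    let currentNumber := currentNumber ++ [char]
    let number := (PySem.Int.ofChars? currentNumber).getD 0
    (numberList ++ [[number, start, n - 1]], start, currentNumber)
  else if PySem.Chars.isdigit char && currentNumber.isEmpty then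
    (numberList, index, currentNumber ++ [char])
  else if PySem.Chars.isdigit char && (index == n - 1) && !currentNumber.isEmpty then
    let currentNumber := currentNumber ++ [char]
    let number := (PySem.Int.ofChars? currentNumber).getD 0
    (numberList ++ [[number, start, n - 1]], start, currentNumber)
  else if PySem.Chars.isdigit char && !currentNumber.isEmpty then
    (numberList, start, currentNumber ++ [char])
  else if !(PySem.Chars.isdigit char) && !currentNumber.isEmpty then
    let number := (PySem.Int.ofChars? currentNumber).getD 0
    (numberList ++ [[number, start, index - 1]], 0, [])
  else
    (numberList, start, currentNumber)

def findNumberAndIndex (active : String) : List (List Int) :=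
  let cs := active.toList
  let n : Int := (cs.length : Int)
  ((PySem.List.enumerate cs 0).foldl (pvStepA n) ([], 0, [])).1

-- ===== PORT B =====
-- the groupby key: t[1].isnumeric()  (exact on the ASCII domain)
def pvKey (p : Int × Char) : Bool := PySem.Chars.isdigit p.2

-- itertools.groupby: maximal adjacent runs of equal key, paired with their key
def pvGroups (l : List (Int × Char)) : List (Bool × List (Int × Char)) :=
  match l with
  | [] => []
  | x :: xs =>
    (pvKey x, x :: xs.takeWhile (fun y => pvKey y == pvKey x)) ::
      pvGroups (xs.dropWhile (fun y => pvKey y == pvKey x))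
termination_by l.length
decreasing_by simpa using Nat.lt_succ_of_le (List.length_dropWhile_le _ _)

def findNumberAndIndex_alt (active : String) : List (List Int) :=
  (pvGroups (PySem.List.enumerate active.toList 0)).foldl
    (fun numberList kg =>
      if kg.1 then
        numberList ++
          [[(PySem.Int.ofChars? (kg.2.map (·.2))).getD 0,
            ((PySem.List.pyGet? kg.2 0).getD (0, ' ')).1,
            ((PySem.List.pyGet? kg.2 (-1)).getD (0, ' ')).1]]
      else numberList) []

-- ===== PRECONDITION & SPEC =====
def Spec_findNumberAndIndex (active : String) (out : List (List Int)) : Prop := out = findNumberAndIndex_alt active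
instance (active : String) (out : List (List Int)) : Decidable (Spec_findNumberAndIndex active out) := by unfold Spec_findNumberAndIndex; infer_instance

-- ===== CLAIM (what is proved, stated in full; the proofs are below) =====
def Claim_equal_findNumberAndIndex : Prop := ∀ (active : String), Dom_findNumberAndIndex active → Spec_findNumberAndIndex active (findNumberAndIndex active)

-- ===== LEMMAS AND PROOFS =====

-- reference characterization: the list of digit runs with their spans
def pvSpec (i : Int) (l : List Char) : List (List Int) :=
  match l with
  | [] => []
  | c :: rest =>
    if PySem.Chars.isdigit c then
      [(PySem.Int.ofChars? (c :: rest.takeWhile PySem.Chars.isdigit)).getD 0, i,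
        i + ((rest.takeWhile PySem.Chars.isdigit).length : Int)] ::
        pvSpec (i + ((rest.takeWhile PySem.Chars.isdigit).length : Int) + 1)
          (rest.dropWhile PySem.Chars.isdigit)
    else pvSpec (i + 1) rest
termination_by l.length
decreasing_by
  · simpa using Nat.lt_succ_of_le (List.length_dropWhile_le _ _)
  · simp

theorem pvSpec_skip (b : List Char) (i : Int) (r : List Char)
    (hb : ∀ d ∈ b, PySem.Chars.isdigit d = false) :
    pvSpec i (b ++ r) = pvSpec (i + (b.length : Int)) r := by
  induction b generalizing i with
  | nil => simp
  | cons d b ih =>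
    have hd : PySem.Chars.isdigit d = false := hb d (by simp)
    rw [List.cons_append]
    simp only [pvSpec, hd]
    rw [ih (i + 1) (fun e he => hb e (List.mem_cons_of_mem _ he))]
    congr 1
    simp [List.length_cons]
    push_cast
    ring

theorem pvA_run (g : List Char) (n i : Int) (acc : List (List Int)) (start : Int)
    (cur : List Char) (hcur : cur ≠ [])
    (hg : ∀ c ∈ g, PySem.Chars.isdigit c = true)
    (hlt : i + (g.length : Int) < n) :
    (PySem.List.enumerate g i).foldl (pvStepA n) (acc, start, cur) =
      (acc, start, cur ++ g) := by
  induction g generalizing i cur with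
  | nil => simp
  | cons c rest ih =>
    have hc : PySem.Chars.isdigit c = true := hg c (by simp)
    have hne : (i == n - 1) = false := by
      simp only [beq_eq_false_iff_ne, ne_eq]
      intro h; subst h
      simp [List.length_cons] at hlt; omega
    have hcur' : cur.isEmpty = false := by
      cases cur with
      | nil => exact absurd rfl hcur
      | cons a b => simp
    rw [PySem.List.enumerate_cons]
    simp only [List.foldl_cons]
    have hstep : pvStepA n (acc, start, cur) (i, c) = (acc, start, cur ++ [c]) := by
      simp [pvStepA, hc, hne, hcur']
    rw [hstep, ih (i + 1) (cur ++ [c]) (by simp)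
      (fun d hd => hg d (List.mem_cons_of_mem _ hd))
      (by simp [List.length_cons] at hlt ⊢; omega)]
    simp

theorem pvA_main (l : List Char) (n i : Int) (acc : List (List Int)) (s0 : Int)
    (hn : i + (l.length : Int) = n) :
    ((PySem.List.enumerate l i).foldl (pvStepA n) (acc, s0, [])).1 =
      acc ++ pvSpec i l := by
  induction hL : l.length using Nat.strong_induction_on generalizing l i acc s0 with
  | _ N ih =>
  subst hL
  cases l with
  | nil => simp [pvSpec]
  | cons c rest =>
    rw [PySem.List.enumerate_cons]
    simp only [List.foldl_cons]
    by_cases hc : PySem.Chars.isdigit c = true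
    · -- digit: a run starts here
      have hsplit : rest = rest.takeWhile PySem.Chars.isdigit ++ rest.dropWhile PySem.Chars.isdigit :=
        (List.takeWhile_append_dropWhile).symm
      set g := rest.takeWhile PySem.Chars.isdigit with hgdef
      set r := rest.dropWhile PySem.Chars.isdigit with hrdef
      have hgall : ∀ d ∈ g, PySem.Chars.isdigit d = true := fun d hd =>
        List.mem_takeWhile_imp hd
      have hlen : rest.length = g.length + r.length := by
        conv_lhs => rw [hsplit]
        simp
      have hspec : pvSpec i (c :: rest) =
          [(PySem.Int.ofChars? (c :: g)).getD 0, i, i + (g.length : Int)] ::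
            pvSpec (i + (g.length : Int) + 1) r := by
        simp only [pvSpec, hc, if_true, ← hgdef, ← hrdef]
      rw [hspec]
      cases hr : r with
      | nil =>
        -- the string ends with this run
        have hrest : rest = g := by rw [hsplit, hr]; simp
        cases hg0 : g with
        | nil =>
          -- single final digit: branch 1
          have hi : (i == n - 1) = true := by
            simp only [beq_iff_eq]
            rw [hrest, hg0] at hn; simp at hn; omega
          have hstep : pvStepA n (acc, s0, []) (i, c) =
              (acc ++ [[(PySem.Int.ofChars? [c]).getD 0, i, n - 1]], i, [c]) := by
            simp [pvStepA, hc, hi]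
          rw [hstep, hrest, hg0]
          simp only [beq_iff_eq] at hi
          simp [pvSpec, hi]
        | cons d gtl =>
          have hne : (i == n - 1) = false := by
            simp only [beq_eq_false_iff_ne, ne_eq]
            intro h
            rw [hrest, hg0] at hn; simp [List.length_cons] at hn; omega
          have hstep : pvStepA n (acc, s0, []) (i, c) = (acc, i, [c]) := by
            simp [pvStepA, hc, hne]
          rw [hstep, hrest]
          obtain ⟨ginit, glast, hgi⟩ : ∃ gi gl, g = gi ++ [gl] := by
            rcases List.eq_nil_or_concat g with h | ⟨gi, gl, h⟩
            · rw [h] at hg0; cases hg0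
            · exact ⟨gi, gl, by simpa using h⟩
          rw [hgi, PySem.List.enumerate_append, List.foldl_append]
          have hrun := pvA_run ginit n (i + 1) acc i [c] (by simp)
            (fun d hd => hgall d (by simp [hgi, hd]))
            (by rw [hrest, hgi] at hn; simp at hn; omega)
          rw [hrun]
          have hlast : i + 1 + (ginit.length : Int) = n - 1 := by
            rw [hrest, hgi] at hn; simp at hn; omega
          rw [PySem.List.enumerate_cons, PySem.List.enumerate_nil]
          simp only [List.foldl_cons, List.foldl_nil]
          have hglastd : PySem.Chars.isdigit glast = true := hgall glast (by simp [hgi])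
          have hstep2 : pvStepA n (acc, i, [c] ++ ginit) (i + 1 + (ginit.length : Int), glast) =
              (acc ++ [[(PySem.Int.ofChars? (([c] ++ ginit) ++ [glast])).getD 0, i, n - 1]], i,
                ([c] ++ ginit) ++ [glast]) := by
            simp [pvStepA, hglastd, hlast]
          rw [hstep2]
          simp only [List.foldl_nil]
          have hdg : ginit ++ [glast] = d :: gtl := hgi.symm.trans hg0
          have h3 : n - 1 = i + ((d :: gtl).length : Int) := by
            rw [← hdg]
            simp only [List.length_append, List.length_cons, List.length_nil]
            push_cast
            push_cast at hlast
            omega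
          simp [pvSpec, h3, ← hdg]
      | cons c' r' =>
        -- the run ends at the non-digit c'
        have hc' : PySem.Chars.isdigit c' = false := by
          have h1 : rest.dropWhile PySem.Chars.isdigit = c' :: r' := hrdef.symm.trans hr
          have h2 := List.head_dropWhile_not (p := PySem.Chars.isdigit) (l := rest)
            (by simp [h1])
          simpa [h1] using h2
        have hne : (i == n - 1) = false := by
          simp only [beq_eq_false_iff_ne, ne_eq]
          intro h
          rw [hsplit, hr] at hn; simp [List.length_cons] at hn; omega
        have hstep : pvStepA n (acc, s0, []) (i, c) = (acc, i, [c]) := by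
          simp [pvStepA, hc, hne]
        rw [hstep]
        conv_lhs => rw [hsplit, hr, PySem.List.enumerate_append, List.foldl_append]
        have hrun := pvA_run g n (i + 1) acc i [c] (by simp) hgall
          (by rw [hsplit, hr] at hn; simp [List.length_cons] at hn; omega)
        rw [hrun]
        rw [PySem.List.enumerate_cons]
        simp only [List.foldl_cons]
        have hstep2 : pvStepA n (acc, i, [c] ++ g) (i + 1 + (g.length : Int), c') =
            (acc ++ [[(PySem.Int.ofChars? ([c] ++ g)).getD 0, i, i + 1 + (g.length : Int) - 1]],
              0, []) := by
          simp [pvStepA, hc']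
        rw [hstep2]
        have hrec := ih r'.length
          (by rw [hsplit, hr]; simp [List.length_cons]; omega) r'
          (i + 1 + (g.length : Int) + 1)
          (acc ++ [[(PySem.Int.ofChars? ([c] ++ g)).getD 0, i, i + 1 + (g.length : Int) - 1]]) 0
          (by rw [hsplit, hr] at hn; simp [List.length_cons] at hn ⊢; omega) rfl
        rw [hrec]
        simp only [pvSpec, hc']
        have h4 : i + 1 + (g.length : Int) - 1 = i + (g.length : Int) := by omega
        have h5 : i + 1 + (g.length : Int) + 1 = i + (g.length : Int) + 1 + 1 := by omega
        simp [h4, h5]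
    · -- non-digit with empty currentNumber: nothing happens
      have hc' : PySem.Chars.isdigit c = false := by simpa using hc
      have hstep : pvStepA n (acc, s0, []) (i, c) = (acc, s0, []) := by
        simp [pvStepA, hc']
      rw [hstep]
      rw [ih rest.length (by simp) rest (i + 1) acc s0
        (by simp at hn ⊢; omega) rfl]
      simp [pvSpec, hc']

theorem pvEnum_takeWhile (q : Char → Bool) (l : List Char) (i : Int) :
    (PySem.List.enumerate l i).takeWhile (fun y => q y.2) =
      PySem.List.enumerate (l.takeWhile q) i := by
  induction l generalizing i with
  | nil => simp
  | cons c rest ih =>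
    rw [PySem.List.enumerate_cons, List.takeWhile_cons]
    cases hq : q c with
    | false => simp [List.takeWhile_cons, hq]
    | true => simp [List.takeWhile_cons, hq, ih]

theorem pvEnum_dropWhile (q : Char → Bool) (l : List Char) (i : Int) :
    (PySem.List.enumerate l i).dropWhile (fun y => q y.2) =
      PySem.List.enumerate (l.dropWhile q) (i + ((l.takeWhile q).length : Int)) := by
  induction l generalizing i with
  | nil => simp
  | cons c rest ih =>
    rw [PySem.List.enumerate_cons, List.dropWhile_cons]
    cases hq : q c with
    | false => simp [List.dropWhile_cons, List.takeWhile_cons, hq]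
    | true =>
      simp only [List.dropWhile_cons, List.takeWhile_cons, hq, if_true]
      rw [ih (i + 1)]
      congr 1
      simp [List.length_cons]
      omega

theorem pvEnum_getLast_fst (c : Char) (l : List Char) (i : Int) :
    (((i, c) :: PySem.List.enumerate l (i + 1)).getLast?).map Prod.fst =
      some (i + (l.length : Int)) := by
  induction l generalizing c i with
  | nil => simp
  | cons d rest ih =>
    rw [PySem.List.enumerate_cons, List.getLast?_cons_cons]
    have := ih d (i + 1)
    rw [this]
    congr 1
    simp [List.length_cons]
    omega

theorem pvB_main (l : List Char) (i : Int) (acc : List (List Int)) :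
    (pvGroups (PySem.List.enumerate l i)).foldl
      (fun numberList kg =>
        if kg.1 then
          numberList ++
            [[(PySem.Int.ofChars? (kg.2.map (·.2))).getD 0,
              ((PySem.List.pyGet? kg.2 0).getD (0, ' ')).1,
              ((PySem.List.pyGet? kg.2 (-1)).getD (0, ' ')).1]]
        else numberList) acc = acc ++ pvSpec i l := by
  induction hL : l.length using Nat.strong_induction_on generalizing l i acc with
  | _ N ih =>
  subst hL
  cases l with
  | nil => simp [pvGroups, pvSpec]
  | cons c rest =>
    rw [PySem.List.enumerate_cons]
    rw [pvGroups]
    simp only [List.foldl_cons]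
    cases hk : PySem.Chars.isdigit c with
    | true =>
      have htw : (PySem.List.enumerate rest (i + 1)).takeWhile
          (fun y => pvKey y == pvKey (i, c)) =
          PySem.List.enumerate (rest.takeWhile PySem.Chars.isdigit) (i + 1) := by
        rw [show (fun (y : Int × Char) => pvKey y == pvKey (i, c)) =
          (fun (y : Int × Char) => PySem.Chars.isdigit y.2) from by
            funext y; simp [pvKey, hk]]
        exact pvEnum_takeWhile _ rest (i + 1)
      have hdw : (PySem.List.enumerate rest (i + 1)).dropWhile
          (fun y => pvKey y == pvKey (i, c)) =
          PySem.List.enumerate (rest.dropWhile PySem.Chars.isdigit)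
            (i + 1 + ((rest.takeWhile PySem.Chars.isdigit).length : Int)) := by
        rw [show (fun (y : Int × Char) => pvKey y == pvKey (i, c)) =
          (fun (y : Int × Char) => PySem.Chars.isdigit y.2) from by
            funext y; simp [pvKey, hk]]
        exact pvEnum_dropWhile _ rest (i + 1)
      rw [htw, hdw]
      set g := rest.takeWhile PySem.Chars.isdigit with hgdef
      set r := rest.dropWhile PySem.Chars.isdigit with hrdef
      have hkey : pvKey (i, c) = true := by simp [pvKey, hk]
      have hmap : (((i, c) :: PySem.List.enumerate g (i + 1)).map (fun y => y.2)) = c :: g := by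
        simp [PySem.List.map_snd_enumerate]
      have hhead : (PySem.List.pyGet? ((i, c) :: PySem.List.enumerate g (i + 1)) 0) =
          some (i, c) := PySem.List.pyGet?_zero_cons _ _
      have hlast : ((PySem.List.pyGet? ((i, c) :: PySem.List.enumerate g (i + 1)) (-1)).getD
          (0, ' ')).1 = i + (g.length : Int) := by
        rw [PySem.List.pyGet?_neg_one]
        have := pvEnum_getLast_fst c g i
        cases h : ((i, c) :: PySem.List.enumerate g (i + 1)).getLast? with
        | none => rw [h] at this; simp at this
        | some p =>
          rw [h] at this
          simp at this
          simp [this]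
      rw [ih r.length (by rw [hrdef]; simpa using
          Nat.lt_succ_of_le (List.length_dropWhile_le _ _)) r
        (i + 1 + (g.length : Int)) _ rfl]
      simp only [hkey, if_true, hmap, hhead, hlast]
      simp only [pvSpec, hk, if_true, ← hgdef, ← hrdef]
      have h5 : i + 1 + (g.length : Int) = i + (g.length : Int) + 1 := by omega
      simp [h5]
    | false =>
      have hpred : (fun (y : Int × Char) => pvKey y == pvKey (i, c)) =
          (fun (y : Int × Char) => !PySem.Chars.isdigit y.2) := by
        funext y; simp [pvKey, hk]
      rw [hpred] at *
      have htw := pvEnum_takeWhile (fun d => !PySem.Chars.isdigit d) rest (i + 1)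
      have hdw := pvEnum_dropWhile (fun d => !PySem.Chars.isdigit d) rest (i + 1)
      rw [htw, hdw]
      have hkey : pvKey (i, c) = false := by simp [pvKey, hk]
      simp only [hkey, Bool.false_eq_true, if_false]
      set g' := rest.takeWhile (fun d => !PySem.Chars.isdigit d) with hg'def
      set r' := rest.dropWhile (fun d => !PySem.Chars.isdigit d) with hr'def
      rw [ih r'.length (by rw [hr'def]; simpa using
          Nat.lt_succ_of_le (List.length_dropWhile_le _ _)) r'
        (i + 1 + (g'.length : Int)) acc rfl]
      have hsplit : rest = g' ++ r' := (List.takeWhile_append_dropWhile).symm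
      have hg'all : ∀ d ∈ g', PySem.Chars.isdigit d = false := by
        intro d hd
        have := List.mem_takeWhile_imp hd
        simpa using this
      have : pvSpec i (c :: rest) = pvSpec (i + 1 + (g'.length : Int)) r' := by
        simp only [pvSpec, hk, Bool.false_eq_true, if_false]
        rw [hsplit, pvSpec_skip g' (i + 1) r' hg'all]
      rw [this]

-- ===== VERDICT (by name: the statement is the Claim_ definition above) =====
theorem findNumberAndIndex_spec : Claim_equal_findNumberAndIndex := by
  intro active _
  unfold Spec_findNumberAndIndex findNumberAndIndex findNumberAndIndex_alt
  rw [pvA_main active.toList (active.toList.length : Int) 0 [] 0 (by simp),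
    pvB_main active.toList 0 []]
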